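-- pv_equiv track=rewrite | github.com/sjbrown/misc_work | resolution_cards/tall_cards.py | parse
-- ===== SOURCE A (Python) =====
-- def parse(s):
--     retval = ''
--     for line in s.split('\n'):
--         l = line.strip()
--         if not l:
--             continue
--         if l.startswith('|'):
--             retval += '\n' + l[1:]
--         elif l.startswith('*'):
--             retval += '\n' + l
--         else:
--             retval += ' ' + l
--
--     return retval.strip()
-- ===== SOURCE B (Python) =====
-- def parse(s):
--     # Staged: clean lines first, then split the stream into marker-delimited
--     # groups (takewhile/dropwhile), render each group with ' '.join, join with '\n'.
--     cleaned = [l for l in map(str.strip, s.split('\n')) if l]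
--
--     def is_marker(l):
--         return l.startswith('|') or l.startswith('*')
--
--     def split_plains(ls):
--         i = 0
--         while i < len(ls) and not is_marker(ls[i]):
--             i += 1
--         return ls[:i], ls[i:]
--
--     plains, rest = split_plains(cleaned)
--     out = [' ' + ' '.join(plains)] if plains else []
--     while rest:
--         head = rest[0]
--         content = head[1:] if head.startswith('|') else head
--         plains, rest = split_plains(rest[1:])
--         out.append(' '.join([content] + plains))
--     return '\n'.join(out).strip()
-- ===== Notes on version B (the rewrite author's own statement) =====
-- stated objective: alternative
-- what changed: B is a staged pipeline: it first cleans the lines (strip, drop empties), then splits the stream into marker-delimited groups with takewhile/dropwhile-style scans, renders each group by space-joining and newline-joins the groups, instead of A's single pass that prepends a separator per line onto one running string.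
import Mathlib
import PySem

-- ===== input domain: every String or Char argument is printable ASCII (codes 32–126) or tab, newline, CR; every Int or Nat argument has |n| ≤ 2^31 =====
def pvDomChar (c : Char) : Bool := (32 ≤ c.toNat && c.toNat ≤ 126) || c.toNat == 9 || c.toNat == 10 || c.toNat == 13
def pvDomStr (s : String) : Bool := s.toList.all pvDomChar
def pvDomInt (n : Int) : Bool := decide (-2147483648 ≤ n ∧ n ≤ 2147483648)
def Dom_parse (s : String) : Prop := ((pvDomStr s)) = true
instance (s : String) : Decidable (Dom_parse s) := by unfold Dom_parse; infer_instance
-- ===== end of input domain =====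

-- B replaces A's single running-string pass by a staged pipeline (clean lines, split into
-- marker-delimited groups, space-join each group, newline-join the groups): an
-- alternative decomposition, same cost.

-- ===== PORT A =====
-- loop body of A: retval is the running string
def parseStepA (retval : String) (line : String) : String :=
  let l := PySem.Str.strip line
  if l = "" then retval
  else if PySem.Str.startswith l "|" then retval ++ "\n" ++ PySem.Str.slice l (some 1) none
  else if PySem.Str.startswith l "*" then retval ++ "\n" ++ l
  else retval ++ " " ++ l

def parse (s : String) : String :=
  -- s.split('\n'): sep "\n" ≠ "", so Str.split? is always `some`
  PySem.Str.strip (((PySem.Str.split? s "\n").getD []).foldl parseStepA "")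

-- ===== PORT B =====
def isMarkerB (l : String) : Bool :=
  PySem.Str.startswith l "|" || PySem.Str.startswith l "*"

-- Source B's split_plains scans to the first marker and splits there: takeWhile/dropWhile
-- Source B's main while-loop: one group per marker line
def groupsB : List String → List String
  | [] => []
  | h :: t =>
    let content := if PySem.Str.startswith h "|" then PySem.Str.slice h (some 1) none else h
    PySem.Str.join " " (content :: t.takeWhile (fun l => !isMarkerB l)) ::
      groupsB (t.dropWhile (fun l => !isMarkerB l))
termination_by ls => ls.length
decreasing_by
  simpa using Nat.lt_succ_of_le (List.length_dropWhile_le _ _)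

def parse_alt (s : String) : String :=
  let cleaned := (((PySem.Str.split? s "\n").getD []).map PySem.Str.strip).filter (fun l => l != "")
  let plains := cleaned.takeWhile (fun l => !isMarkerB l)
  let rest := cleaned.dropWhile (fun l => !isMarkerB l)
  let out := (if plains = [] then [] else [" " ++ PySem.Str.join " " plains]) ++ groupsB rest
  PySem.Str.strip (PySem.Str.join "\n" out)

-- ===== PRECONDITION & SPEC =====
def Spec_parse (s : String) (out : String) : Prop := out = parse_alt s
instance (s : String) (out : String) : Decidable (Spec_parse s out) := by unfold Spec_parse; infer_instance

-- ===== CLAIM (what is proved, stated in full; the proofs are below) =====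
def Claim_equal_parse : Prop := ∀ (s : String), Dom_parse s → Spec_parse s (parse s)

-- ===== LEMMAS AND PROOFS =====

-- the token A appends for one cleaned (stripped, non-empty) line
def tokA (l : String) : String :=
  if PySem.Str.startswith l "|" then "\n" ++ PySem.Str.slice l (some 1) none
  else if PySem.Str.startswith l "*" then "\n" ++ l
  else " " ++ l

def tokcat : List String → String
  | [] => ""
  | l :: t => tokA l ++ tokcat t

-- concatenation of plain-line tokens
def spTail : List String → String
  | [] => ""
  | p :: t => " " ++ p ++ spTail t

-- concatenation of "\n"-prefixed group strings
def nlcat : List String → String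
  | [] => ""
  | g :: gs => "\n" ++ g ++ nlcat gs

theorem tokcat_append (L M : List String) :
    tokcat (L ++ M) = tokcat L ++ tokcat M := by
  induction L with
  | nil => simp [tokcat]
  | cons l t ih => simp [tokcat, ih, String.append_assoc]

-- one A-step from accumulator r is the step from "" appended to r
theorem parseStepA_shift (r line : String) :
    parseStepA r line = r ++ parseStepA "" line := by
  simp only [parseStepA]
  split_ifs <;> simp [String.append_assoc]

-- A's fold only ever appends: factor the accumulator out
theorem foldA_shift (L : List String) (r : String) :
    L.foldl parseStepA r = r ++ L.foldl parseStepA "" := by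
  induction L generalizing r with
  | nil => simp [List.foldl]
  | cons l L ih =>
    simp only [List.foldl]
    rw [ih (parseStepA r l), ih (parseStepA "" l), parseStepA_shift r l,
      String.append_assoc]

-- A's fold is the concatenation of the tokens of the cleaned lines
theorem foldA_eq_tokcat (L : List String) :
    L.foldl parseStepA "" = tokcat ((L.map PySem.Str.strip).filter (fun l => l != "")) := by
  induction L with
  | nil => simp [List.foldl, tokcat]
  | cons h t ih =>
    rw [List.map_cons, List.filter_cons, show (h :: t).foldl parseStepA "" =
      t.foldl parseStepA (parseStepA "" h) from rfl, foldA_shift]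
    by_cases he : PySem.Str.strip h = ""
    · have h1 : parseStepA "" h = "" := by simp [parseStepA, he]
      rw [h1, if_neg (by simp [he])]
      simpa using ih
    · have h1 : parseStepA "" h = tokA (PySem.Str.strip h) := by
        simp only [parseStepA, tokA, if_neg he]
        split_ifs <;> simp
      rw [if_pos (by simp [he]), h1, ih]
      rfl

-- ' '.join over a cons: head, then one space before each tail element
theorem joinSpace (c : String) (ps : List String) :
    PySem.Str.join " " (c :: ps) = c ++ spTail ps := by
  induction ps generalizing c with
  | nil =>
    apply String.toList_inj.mp
    simp [PySem.Str.toList_join, PySem.Chars.join_singleton, spTail]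
  | cons p t ih =>
    apply String.toList_inj.mp
    have hrec := congrArg String.toList (ih p)
    simp only [PySem.Str.toList_join, String.toList_append, List.map_cons] at hrec ⊢
    rw [PySem.Chars.join_cons_cons, hrec]
    simp [spTail, List.append_assoc]

-- '\n'.join over a cons
theorem joinNL (g : String) (gs : List String) :
    PySem.Str.join "\n" (g :: gs) = g ++ nlcat gs := by
  induction gs generalizing g with
  | nil =>
    apply String.toList_inj.mp
    simp [PySem.Str.toList_join, PySem.Chars.join_singleton, nlcat]
  | cons x t ih =>
    apply String.toList_inj.mp
    have hrec := congrArg String.toList (ih x)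
    simp only [PySem.Str.toList_join, String.toList_append, List.map_cons] at hrec ⊢
    rw [PySem.Chars.join_cons_cons, hrec]
    simp [nlcat, List.append_assoc]

-- plain-line tokens concatenate to spTail
theorem tokcat_plains (ps : List String) (hp : ∀ p ∈ ps, isMarkerB p = false) :
    tokcat ps = spTail ps := by
  induction ps with
  | nil => rfl
  | cons p t ih =>
    have hpm := hp p (by simp)
    simp only [isMarkerB, Bool.or_eq_false_iff] at hpm
    rw [show tokcat (p :: t) = tokA p ++ tokcat t from rfl,
      ih (fun q hq => hp q (by simp [hq])),
      show tokA p = " " ++ p from by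
        simp only [tokA]
        rw [if_neg (by rw [hpm.1]; decide), if_neg (by rw [hpm.2]; decide)]]
    simp [spTail, String.append_assoc]

-- head of dropWhile fails the predicate
theorem dropWhile_head_marker (L : List String) (h : String) (t : List String)
    (he : L.dropWhile (fun l => !isMarkerB l) = h :: t) : isMarkerB h = true := by
  induction L with
  | nil => simp [List.dropWhile] at he
  | cons x xs ih =>
    by_cases hx : isMarkerB x
    · simp [List.dropWhile, hx] at he
      rw [← he.1]; exact hx
    · simp only [List.dropWhile, hx, Bool.not_false] at he
      exact ih he

-- a leading newline disappears under strip
theorem strip_newline_cons (x : String) :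
    PySem.Str.strip ("\n" ++ x) = PySem.Str.strip x := by
  apply String.toList_inj.mp
  simp only [PySem.Str.toList_strip, String.toList_append]
  have : ("\n" : String).toList = ['\n'] := by decide
  rw [this]
  simp [PySem.Chars.strip, PySem.Chars.lstrip, PySem.Chars.isspace]

-- main grouping invariant: when the list starts at a marker (or is empty),
-- the token concatenation is the '\n'-prefixed concatenation of B's groups
theorem tokcat_groups (C : List String)
    (hM : ∀ h t, C = h :: t → isMarkerB h = true) :
    tokcat C = nlcat (groupsB C) := by
  induction C using groupsB.induct with
  | case1 => simp [groupsB, tokcat, nlcat]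
  | case2 h t ih =>
    have hm := hM h t rfl
    have hgb : groupsB (h :: t) =
        PySem.Str.join " " ((if PySem.Str.startswith h "|" then PySem.Str.slice h (some 1) none else h) ::
            t.takeWhile (fun l => !isMarkerB l)) ::
          groupsB (t.dropWhile (fun l => !isMarkerB l)) := by
      rw [groupsB]
    have htok : tokcat (h :: t) =
        tokA h ++ (tokcat (t.takeWhile (fun l => !isMarkerB l)) ++
          tokcat (t.dropWhile (fun l => !isMarkerB l))) := by
      conv_lhs => rw [show tokcat (h :: t) = tokA h ++ tokcat t from rfl,
        ← List.takeWhile_append_dropWhile (p := fun l => !isMarkerB l) (l := t),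
        tokcat_append]
    have hplains : tokcat (t.takeWhile (fun l => !isMarkerB l)) =
        spTail (t.takeWhile (fun l => !isMarkerB l)) :=
      tokcat_plains _ (fun p hp => by simpa using List.mem_takeWhile_imp hp)
    have hrest : tokcat (t.dropWhile (fun l => !isMarkerB l)) =
        nlcat (groupsB (t.dropWhile (fun l => !isMarkerB l))) :=
      ih (fun h' t' he' => dropWhile_head_marker t h' t' he')
    have hcontent : tokA h =
        "\n" ++ (if PySem.Str.startswith h "|" then PySem.Str.slice h (some 1) none else h) := by
      simp only [isMarkerB, Bool.or_eq_true] at hm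
      by_cases hb : PySem.Str.startswith h "|" = true
      · simp only [tokA]
        rw [if_pos hb, if_pos hb]
      · rcases hm with hm | hm
        · exact absurd hm hb
        · simp only [tokA]
          rw [if_neg hb, if_neg hb, if_pos hm]
    rw [htok, hgb, hplains, hrest]
    simp only [nlcat, hcontent, joinSpace]
    simp [String.append_assoc]

-- the two pipelines agree (up to the final strip) on any cleaned line list
theorem main_eq (C : List String) :
    PySem.Str.strip (tokcat C) =
      PySem.Str.strip (PySem.Str.join "\n"
        ((if C.takeWhile (fun l => !isMarkerB l) = [] then []
          else [" " ++ PySem.Str.join " " (C.takeWhile (fun l => !isMarkerB l))]) ++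
          groupsB (C.dropWhile (fun l => !isMarkerB l)))) := by
  have hplains : tokcat (C.takeWhile (fun l => !isMarkerB l)) =
      spTail (C.takeWhile (fun l => !isMarkerB l)) :=
    tokcat_plains _ (fun p hp => by simpa using List.mem_takeWhile_imp hp)
  have hrest : tokcat (C.dropWhile (fun l => !isMarkerB l)) =
      nlcat (groupsB (C.dropWhile (fun l => !isMarkerB l))) :=
    tokcat_groups _ (fun h' t' he' => dropWhile_head_marker C h' t' he')
  have h1 : tokcat C = spTail (C.takeWhile (fun l => !isMarkerB l)) ++
      nlcat (groupsB (C.dropWhile (fun l => !isMarkerB l))) := by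
    conv_lhs => rw [← List.takeWhile_append_dropWhile (p := fun l => !isMarkerB l) (l := C),
      tokcat_append]
    rw [hplains, hrest]
  rw [h1]
  by_cases hpe : C.takeWhile (fun l => !isMarkerB l) = []
  · rw [hpe, if_pos rfl, List.nil_append]
    simp only [spTail, String.empty_append]
    cases hg : groupsB (C.dropWhile (fun l => !isMarkerB l)) with
    | nil => simp [nlcat, PySem.Str.join, PySem.Chars.join_nil]
    | cons g gs => rw [joinNL, nlcat, String.append_assoc, strip_newline_cons]
  · rw [if_neg hpe, List.singleton_append, joinNL]
    cases hplc : C.takeWhile (fun l => !isMarkerB l) with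
    | nil => exact absurd hplc hpe
    | cons p pt => rw [joinSpace]; simp [spTail, String.append_assoc]

-- ===== VERDICT (by name: the statement is the Claim_ definition above) =====
theorem parse_spec : Claim_equal_parse := by
  intro s _
  unfold Spec_parse parse
  rw [foldA_eq_tokcat]
  exact main_eq _
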